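-- pv_equiv track=rewrite | github.com/JoshuaFantillo/comparing-different-machine-learning-models-to-predict-group-performance | get_attributes.py | bag_of_words_and_tags
-- ===== SOURCE A (Python) =====
-- def bag_of_words_and_tags(words_and_tags):
-- 	bag_of_words = []
-- 	bag_of_tags = []
-- 	for item in words_and_tags:
-- 		for pair in item:
-- 			word, tags = pair
-- 			bag_of_words.append(word)
-- 			bag_of_tags.append(tags)
-- 	return bag_of_words, bag_of_tags
-- ===== SOURCE B (Python) =====
-- def bag_of_words_and_tags(words_and_tags):
--     flat = [pair for item in words_and_tags for pair in item]
--     if not flat: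
--         return [], []
--     words, tags = zip(*flat)
--     return list(words), list(tags)
-- ===== Notes on version B (the rewrite author's own statement) =====
-- stated objective: idiomatic
-- what changed: Replaces the nested append-as-you-go loops with a flatten-then-transpose decomposition (one flatten comprehension plus zip(*flat) to unzip).
import Mathlib
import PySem

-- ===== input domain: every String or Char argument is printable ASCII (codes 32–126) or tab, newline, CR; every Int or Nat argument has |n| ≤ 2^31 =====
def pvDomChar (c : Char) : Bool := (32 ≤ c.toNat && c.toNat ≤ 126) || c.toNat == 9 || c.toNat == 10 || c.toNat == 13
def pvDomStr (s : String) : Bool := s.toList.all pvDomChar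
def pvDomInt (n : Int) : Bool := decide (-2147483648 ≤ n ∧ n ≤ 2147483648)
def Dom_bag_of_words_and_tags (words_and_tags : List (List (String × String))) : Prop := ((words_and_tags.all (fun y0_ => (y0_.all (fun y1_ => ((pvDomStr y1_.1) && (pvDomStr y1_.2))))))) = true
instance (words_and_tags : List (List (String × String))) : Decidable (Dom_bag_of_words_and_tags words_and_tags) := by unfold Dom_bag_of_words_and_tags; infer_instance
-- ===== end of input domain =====

-- ===== PORT A =====
-- B flattens the nested pairs once and unzips, instead of A's nested append loops (idiomatic decomposition).
def bag_of_words_and_tags (words_and_tags : List (List (String × String))) : List String × List String :=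
  words_and_tags.foldl
    (fun acc item =>
      item.foldl (fun acc2 pair => (acc2.1 ++ [pair.1], acc2.2 ++ [pair.2])) acc)
    ([], [])

-- ===== PORT B =====
def bag_of_words_and_tags_alt (words_and_tags : List (List (String × String))) : List String × List String :=
  let flat := words_and_tags.flatMap (fun item => item)
  if flat = [] then ([], []) else flat.unzip

-- ===== PRECONDITION & SPEC =====
def Spec_bag_of_words_and_tags (words_and_tags : List (List (String × String))) (out : List String × List String) : Prop := out = bag_of_words_and_tags_alt words_and_tags
instance (words_and_tags : List (List (String × String))) (out : List String × List String) : Decidable (Spec_bag_of_words_and_tags words_and_tags out) := by unfold Spec_bag_of_words_and_tags; infer_instance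

-- ===== CLAIM (what is proved, stated in full; the proofs are below) =====
def Claim_equal_bag_of_words_and_tags : Prop := ∀ (words_and_tags : List (List (String × String))), Dom_bag_of_words_and_tags words_and_tags → Spec_bag_of_words_and_tags words_and_tags (bag_of_words_and_tags words_and_tags)

-- ===== LEMMAS AND PROOFS =====

-- ===== VERDICT (by name: the statement is the Claim_ definition above) =====
lemma inner_foldl (item : List (String × String)) (acc : List String × List String) :
    item.foldl (fun acc2 pair => (acc2.1 ++ [pair.1], acc2.2 ++ [pair.2])) acc
      = (acc.1 ++ item.map Prod.fst, acc.2 ++ item.map Prod.snd) := by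
  induction item generalizing acc with
  | nil => simp
  | cons p t ih => simp [List.foldl, ih]

lemma outer_foldl (w : List (List (String × String))) (acc : List String × List String) :
    w.foldl (fun acc item =>
        item.foldl (fun acc2 pair => (acc2.1 ++ [pair.1], acc2.2 ++ [pair.2])) acc) acc
      = (acc.1 ++ (w.flatMap (fun item => item)).map Prod.fst,
         acc.2 ++ (w.flatMap (fun item => item)).map Prod.snd) := by
  induction w generalizing acc with
  | nil => simp
  | cons h t ih => rw [List.foldl_cons, ih, inner_foldl]; simp

theorem bag_of_words_and_tags_spec : Claim_equal_bag_of_words_and_tags := by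
  intro w _
  unfold Spec_bag_of_words_and_tags bag_of_words_and_tags bag_of_words_and_tags_alt
  rw [outer_foldl]
  by_cases h : List.flatMap (fun item => item : List (String × String) → _) w = [] <;>
    simp [h, List.unzip_eq_map]
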